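-- pv_equiv track=rewrite | github.com/altvictor/Chess-Clone | pieces.py | getPossible
-- ===== SOURCE A (Python) =====
-- def getPossible(moves, impossible):
--     # get the final valid possible moves
--     possible = moves[:]
--     destroy = []
--     # remove the places where the pieces cannot move to
--     for a in range(len(possible)):
--         for b in range(len(impossible)):
--             if possible[a] == impossible[b]:
--                 destroy.append(possible[a])
--     destroy = list(set(destroy))
--     for item in destroy:
--         possible.remove(item)
--     return possible
-- ===== SOURCE B (Python) =====
-- def getPossible(moves, impossible):
--     # one pass: drop the first occurrence of each value that is also impossible
--     banned = set(impossible)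
--     removed = set()
--     out = []
--     for m in moves:
--         if m in banned and m not in removed:
--             removed.add(m)
--         else:
--             out.append(m)
--     return out
-- ===== Notes on version B (the rewrite author's own statement) =====
-- stated objective: faster
-- what changed: Replaces A's quadratic gather-all-matching-pairs, dedupe, then remove-by-value passes with a single pass over moves that keeps a set of already-dropped values and skips the first occurrence of each impossible value.
import Mathlib
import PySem

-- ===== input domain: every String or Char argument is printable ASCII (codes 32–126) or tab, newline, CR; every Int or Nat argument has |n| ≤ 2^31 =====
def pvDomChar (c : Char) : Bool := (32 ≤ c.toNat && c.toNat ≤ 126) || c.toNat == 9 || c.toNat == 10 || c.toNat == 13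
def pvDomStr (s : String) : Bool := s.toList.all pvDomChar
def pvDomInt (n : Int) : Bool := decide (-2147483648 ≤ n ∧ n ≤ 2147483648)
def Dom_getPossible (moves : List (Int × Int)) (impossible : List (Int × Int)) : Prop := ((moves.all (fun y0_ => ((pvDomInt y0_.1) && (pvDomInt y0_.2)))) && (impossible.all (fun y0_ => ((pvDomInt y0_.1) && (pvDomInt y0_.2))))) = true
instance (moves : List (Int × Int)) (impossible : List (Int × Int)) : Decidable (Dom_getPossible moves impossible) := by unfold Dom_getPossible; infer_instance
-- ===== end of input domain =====

-- B replaces A's quadratic pair-gathering + dedupe + remove-by-value passes with one pass over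
-- moves keeping a set of already-dropped values; measured faster in a timing run.
-- ===== PORT A =====
-- Note: Python's `for item in list(set(destroy))` iterates in unspecified hash order; the final
-- result does not depend on that order (distinct values, each removed once), so the port uses
-- PySem.Set.ofList's first-occurrence order. `possible.remove(item)` never raises here; its total
-- form (remove? ...).getD is exact on these inputs.
def getPossible (moves : List (Int × Int)) (impossible : List (Int × Int)) : List (Int × Int) :=
  let possible := moves
  let destroy : List (Int × Int) :=
    (PySem.List.pyRange 0 (PySem.List.len possible) 1).foldl (fun acc a =>
      (PySem.List.pyRange 0 (PySem.List.len impossible) 1).foldl (fun acc2 b =>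
        if PySem.List.pyGetD possible a (0, 0) = PySem.List.pyGetD impossible b (0, 0) then
          acc2 ++ [PySem.List.pyGetD possible a (0, 0)]
        else acc2) acc) []
  let destroy2 : PySem.Set (Int × Int) := PySem.Set.ofList destroy
  destroy2.foldl (fun l item => (PySem.List.remove? l item).getD l) possible

-- ===== PORT B =====
def getPossible_alt (moves : List (Int × Int)) (impossible : List (Int × Int)) : List (Int × Int) :=
  let banned : PySem.Set (Int × Int) := PySem.Set.ofList impossible
  let st := moves.foldl (fun (st : List (Int × Int) × PySem.Set (Int × Int)) m =>
    if banned.contains m && !(st.2.contains m) then (st.1, PySem.Set.add st.2 m)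
    else (st.1 ++ [m], st.2)) ([], PySem.Set.empty)
  st.1

-- ===== PRECONDITION & SPEC =====
def Spec_getPossible (moves : List (Int × Int)) (impossible : List (Int × Int)) (out : List (Int × Int)) : Prop := out = getPossible_alt moves impossible
instance (moves : List (Int × Int)) (impossible : List (Int × Int)) (out : List (Int × Int)) : Decidable (Spec_getPossible moves impossible out) := by unfold Spec_getPossible; infer_instance

-- ===== CLAIM (what is proved, stated in full; the proofs are below) =====
def Claim_equal_getPossible : Prop := ∀ (moves : List (Int × Int)) (impossible : List (Int × Int)), Dom_getPossible moves impossible → Spec_getPossible moves impossible (getPossible moves impossible)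

-- ===== LEMMAS AND PROOFS =====

-- B's loop body, as a structural recursion (related to the foldl below).
def gpGo (banned : PySem.Set (Int × Int)) : List (Int × Int) → PySem.Set (Int × Int) → List (Int × Int)
  | [], _ => []
  | m :: t, removed =>
    if m ∈ banned ∧ m ∉ removed then gpGo banned t (PySem.Set.add removed m)
    else m :: gpGo banned t removed

theorem gpAlt_foldl_eq_go (banned : PySem.Set (Int × Int)) (l : List (Int × Int))
    (acc : List (Int × Int)) (R : PySem.Set (Int × Int)) :
    (l.foldl (fun (st : List (Int × Int) × PySem.Set (Int × Int)) m =>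
      if banned.contains m && !(st.2.contains m) then (st.1, PySem.Set.add st.2 m)
      else (st.1 ++ [m], st.2)) (acc, R)).1 = acc ++ gpGo banned l R := by
  induction l generalizing acc R with
  | nil => simp [gpGo]
  | cons m t ih =>
    simp only [List.foldl_cons, gpGo]
    by_cases h : m ∈ banned ∧ m ∉ R
    · have hc : (banned.contains m && !(PySem.Set.contains R m)) = true := by
        simp [h.1, h.2]
      rw [if_pos hc, if_pos h]
      exact ih acc (PySem.Set.add R m)
    · have hc : (banned.contains m && !(PySem.Set.contains R m)) = false := by
        by_cases hb : m ∈ banned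
        · have hr : m ∈ R := by by_contra hr; exact h ⟨hb, hr⟩
          simp [hr]
        · simp [hb]
      rw [if_neg (by rw [hc]; simp), if_neg h]
      rw [ih (acc ++ [m]) R, List.append_assoc]
      rfl

theorem removeD_eq_erase (l : List (Int × Int)) (v : Int × Int) :
    (PySem.List.remove? l v).getD l = l.erase v := by
  by_cases h : v ∈ l
  · rw [PySem.List.remove?_eq_some_erase l v h]; rfl
  · rw [(PySem.List.remove?_eq_none_iff l v).mpr h, List.erase_of_not_mem h]; rfl

-- destroy's inner loop: what one pass over `impossible` gathers.
theorem mem_destroy_inner (impossible : List (Int × Int)) (p v : Int × Int) :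
    ∀ acc : List (Int × Int),
      (v ∈ impossible.foldl (fun acc2 q => if p = q then acc2 ++ [p] else acc2) acc
        ↔ v ∈ acc ∨ (v = p ∧ p ∈ impossible)) := by
  induction impossible with
  | nil => simp
  | cons q imp ih =>
    intro acc
    simp only [List.foldl_cons]
    by_cases hpq : p = q
    · rw [if_pos hpq, ih]
      simp [← hpq]
      tauto
    · rw [if_neg hpq, ih]
      simp [List.mem_cons]
      constructor
      · rintro (h | ⟨rfl, h⟩)
        · exact Or.inl h
        · exact Or.inr ⟨rfl, Or.inr h⟩
      · rintro (h | ⟨rfl, (h | h)⟩)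
        · exact Or.inl h
        · exact absurd h hpq
        · exact Or.inr ⟨rfl, h⟩

-- destroy's membership: a value is gathered iff it occurs in both lists.
theorem mem_destroy (moves impossible : List (Int × Int)) (v : Int × Int) :
    v ∈ moves.foldl (fun acc p =>
        impossible.foldl (fun acc2 q => if p = q then acc2 ++ [p] else acc2) acc) []
      ↔ v ∈ moves ∧ v ∈ impossible := by
  have gen : ∀ acc : List (Int × Int),
      v ∈ moves.foldl (fun acc p =>
          impossible.foldl (fun acc2 q => if p = q then acc2 ++ [p] else acc2) acc) acc
        ↔ v ∈ acc ∨ (v ∈ moves ∧ v ∈ impossible) := by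
    induction moves with
    | nil => simp
    | cons m t ih =>
      intro acc
      simp only [List.foldl_cons]
      rw [ih, mem_destroy_inner]
      simp [List.mem_cons]
      constructor
      · rintro ((h | ⟨rfl, h⟩) | ⟨h1, h2⟩)
        · exact Or.inl h
        · exact Or.inr ⟨Or.inl rfl, h⟩
        · exact Or.inr ⟨Or.inr h1, h2⟩
      · rintro (h | ⟨(rfl | h1), h2⟩)
        · exact Or.inl (Or.inl h)
        · exact Or.inl (Or.inr ⟨rfl, h2⟩)
        · exact Or.inr ⟨h1, h2⟩
  simpa using gen []

-- foldl of erase over a list not containing the head keeps the head.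
theorem foldl_erase_cons_not_mem (D : List (Int × Int)) (m : Int × Int) :
    ∀ t : List (Int × Int), m ∉ D → D.foldl List.erase (m :: t) = m :: D.foldl List.erase t := by
  induction D with
  | nil => intro t _; rfl
  | cons d D' ih =>
    intro t h
    have hdm : ¬((m : Int × Int) == d) = true := by
      simp only [beq_iff_eq]
      intro he
      exact h (he ▸ List.mem_cons_self)
    rw [List.foldl_cons, List.foldl_cons, List.erase_cons_tail hdm]
    exact ih _ (fun hm => h (List.mem_cons_of_mem _ hm))

-- Main invariant: removing (first occurrence of) each element of a duplicate-free list D,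
-- where D holds exactly the not-yet-removed banned values of l, is B's single pass.
theorem erase_fold_eq_go (banned : PySem.Set (Int × Int)) (l D : List (Int × Int))
    (R : PySem.Set (Int × Int)) (hnd : D.Nodup)
    (hmem : ∀ v, v ∈ D ↔ v ∈ l ∧ v ∈ banned ∧ v ∉ R) :
    D.foldl List.erase l = gpGo banned l R := by
  induction l generalizing D R with
  | nil =>
    have : D = [] := List.eq_nil_iff_forall_not_mem.mpr (fun v hv => by simp [hmem v] at hv)
    simp [this, gpGo]
  | cons m t ih =>
    by_cases h : m ∈ banned ∧ m ∉ R
    · have hmD : m ∈ D := (hmem m).mpr ⟨List.mem_cons_self, h.1, h.2⟩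
      have hperm : D.Perm (m :: D.erase m) := List.perm_cons_erase hmD
      have hcomm : ∀ x ∈ D, ∀ y ∈ D, ∀ z : List (Int × Int),
          List.erase (List.erase z x) y = List.erase (List.erase z y) x := by
        intro x _ y _ z; rw [List.erase_comm]
      rw [hperm.foldl_eq' hcomm (m :: t)]
      simp only [List.foldl_cons, List.erase_cons_head]
      simp only [gpGo]
      rw [if_pos h]
      exact ih (D.erase m) (PySem.Set.add R m) (List.Nodup.erase m hnd) (by
        intro v
        rw [hnd.mem_erase_iff]
        constructor
        · rintro ⟨hvm, hvD⟩
          rcases (hmem v).mp hvD with ⟨hvl, hvb, hvR⟩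
          refine ⟨?_, hvb, ?_⟩
          · rcases List.mem_cons.mp hvl with rfl | hvt
            · exact absurd rfl hvm
            · exact hvt
          · rw [PySem.Set.mem_add]; push Not; exact ⟨hvR, hvm⟩
        · rintro ⟨hvt, hvb, hvR⟩
          rw [PySem.Set.mem_add] at hvR; push Not at hvR
          exact ⟨hvR.2, (hmem v).mpr ⟨List.mem_cons_of_mem _ hvt, hvb, hvR.1⟩⟩)
    · have hmD : m ∉ D := fun hmD => h ⟨((hmem m).mp hmD).2.1, ((hmem m).mp hmD).2.2⟩
      rw [foldl_erase_cons_not_mem D m t hmD]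
      simp only [gpGo]
      rw [if_neg h]
      congr 1
      exact ih D R hnd (by
        intro v
        rw [hmem v]
        constructor
        · rintro ⟨hvl, hvb, hvR⟩
          rcases List.mem_cons.mp hvl with rfl | hvt
          · exact absurd ⟨hvb, hvR⟩ h
          · exact ⟨hvt, hvb, hvR⟩
        · rintro ⟨hvt, hvb, hvR⟩
          exact ⟨List.mem_cons_of_mem _ hvt, hvb, hvR⟩)

-- A's index loops over range(len(..)) read exactly the list elements in order.
theorem destroy_range_eq (moves impossible : List (Int × Int)) :
    (PySem.List.pyRange 0 (PySem.List.len moves) 1).foldl (fun acc a =>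
      (PySem.List.pyRange 0 (PySem.List.len impossible) 1).foldl (fun acc2 b =>
        if PySem.List.pyGetD moves a (0, 0) = PySem.List.pyGetD impossible b (0, 0) then
          acc2 ++ [PySem.List.pyGetD moves a (0, 0)]
        else acc2) acc) []
    = moves.foldl (fun acc p =>
        impossible.foldl (fun acc2 q => if p = q then acc2 ++ [p] else acc2) acc) [] := by
  rw [PySem.List.foldl_pyRange_zero_pyGetD moves (0, 0) (fun acc p =>
    (PySem.List.pyRange 0 (PySem.List.len impossible) 1).foldl (fun acc2 b =>
      if p = PySem.List.pyGetD impossible b (0, 0) then acc2 ++ [p] else acc2) acc) []]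
  apply PySem.List.foldl_congr_mem
  intro acc p _
  exact PySem.List.foldl_pyRange_zero_pyGetD impossible (0, 0)
    (fun acc2 q => if p = q then acc2 ++ [p] else acc2) acc

-- ===== VERDICT (by name: the statement is the Claim_ definition above) =====
theorem getPossible_spec : Claim_equal_getPossible := by
  intro moves impossible _
  unfold Spec_getPossible getPossible getPossible_alt
  dsimp only
  rw [gpAlt_foldl_eq_go, List.nil_append, destroy_range_eq]
  simp only [removeD_eq_erase]
  apply erase_fold_eq_go
  · exact PySem.Set.nodup_ofList _
  · intro v
    rw [PySem.Set.mem_ofList, mem_destroy]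
    simp [PySem.Set.mem_ofList, PySem.Set.empty]
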